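-- pv_equiv track=rewrite | github.com/LITdrive/aadc2018 | src/aadcUserPython/litdrive/litdrive/zeromq/demo/trajectory.py | build_trajectory_array_buffer
-- ===== SOURCE A (Python) =====
-- TRAJECTORY_ARRAY_SIZE = 10
--
-- TRAJECTORY_NUM_FIELDS = 12
--
-- def build_trajectory_array_buffer(trajectories):
--     if not trajectories or len(trajectories) == 0:
--         return None
--
--     assert len(trajectories) <= TRAJECTORY_ARRAY_SIZE
--     buffer = ([[0] * TRAJECTORY_NUM_FIELDS] * TRAJECTORY_ARRAY_SIZE)
--
--     for i, trajectory in enumerate(trajectories):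
--         buffer[i] = trajectory
--
--     def _flatten(data):
--         return [item for sublist in data for item in sublist]
--
--     return [len(trajectories)] + _flatten(buffer)
-- ===== SOURCE B (Python) =====
-- TRAJECTORY_ARRAY_SIZE = 10
--
-- TRAJECTORY_NUM_FIELDS = 12
--
--
-- def build_trajectory_array_buffer(trajectories):
--     if not trajectories:
--         return None
--     assert len(trajectories) <= TRAJECTORY_ARRAY_SIZE
--
--     def _fill(ts, slots):
--         # recursively emit one slot at a time: a trajectory while any remain,
--         # a block of zeros afterwards
--         if slots == 0:
--             return []
--         if ts:
--             return list(ts[0]) + _fill(ts[1:], slots - 1)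
--         return [0] * TRAJECTORY_NUM_FIELDS + _fill(ts, slots - 1)
--
--     return [len(trajectories)] + _fill(trajectories, TRAJECTORY_ARRAY_SIZE)
-- ===== Notes on version B (the rewrite author's own statement) =====
-- stated objective: alternative
-- what changed: B replaces A's staged pipeline (pre-fill a 10x12 zero buffer, overwrite its front slots via enumerate, then flatten) with one recursive pass that counts down the 10 slots, emitting each trajectory while any remain and a 12-zero block thereafter.
import Mathlib
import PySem

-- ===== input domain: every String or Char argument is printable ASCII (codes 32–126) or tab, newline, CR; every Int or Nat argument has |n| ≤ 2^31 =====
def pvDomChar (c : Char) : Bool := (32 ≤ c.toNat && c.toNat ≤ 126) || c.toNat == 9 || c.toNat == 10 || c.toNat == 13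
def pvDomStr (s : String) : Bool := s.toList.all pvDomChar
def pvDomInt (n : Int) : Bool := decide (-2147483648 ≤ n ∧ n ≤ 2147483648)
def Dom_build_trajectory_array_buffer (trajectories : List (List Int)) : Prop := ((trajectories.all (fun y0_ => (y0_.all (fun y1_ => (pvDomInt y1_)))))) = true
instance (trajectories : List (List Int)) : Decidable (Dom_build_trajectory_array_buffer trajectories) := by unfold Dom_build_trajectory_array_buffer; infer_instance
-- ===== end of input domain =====

-- B replaces A's staged pipeline (pre-fill a 10x12 buffer, overwrite front slots, flatten)
-- with one recursive pass counting down the 10 slots (objective: alternative).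

-- ===== PORT A =====
-- [item for sublist in data for item in sublist]
def pyFlatten (data : List (List Int)) : List Int :=
  data.flatMap (fun sublist => sublist)

def build_trajectory_array_buffer (trajectories : List (List Int)) : Option (List Int) :=
  if trajectories.isEmpty || trajectories.length == 0 then
    none
  else
    -- assert len(trajectories) <= 10: excluded by Pre_ (AssertionError)
    let buffer := List.replicate 10 (List.replicate 12 (0 : Int))
    -- for i, trajectory in enumerate(trajectories): buffer[i] = trajectory
    -- (i from enumerate starts at 0, so i ≥ 0 and .toNat is exact here)
    let buffer := List.foldl (fun b (p : Int × List Int) => b.set p.1.toNat p.2)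
      buffer (PySem.List.enumerate trajectories 0)
    some ((trajectories.length : Int) :: pyFlatten buffer)

-- ===== PORT B =====
-- _fill(ts, slots): one slot per recursive step
def fillSlots : List (List Int) → Nat → List Int
  | _, 0 => []
  | t :: ts, Nat.succ k => t ++ fillSlots ts k
  | [], Nat.succ k => List.replicate 12 (0 : Int) ++ fillSlots [] k

def build_trajectory_array_buffer_alt (trajectories : List (List Int)) : Option (List Int) :=
  if trajectories.isEmpty then
    none
  else
    -- assert n <= 10: excluded by Pre_ (AssertionError)
    some ((trajectories.length : Int) :: fillSlots trajectories 10)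

-- ===== PRECONDITION & SPEC =====
-- Pre_ excludes only the inputs with more than 10 trajectories, on which both A and B raise AssertionError.
def Pre_build_trajectory_array_buffer (trajectories : List (List Int)) : Prop :=
  trajectories.length ≤ 10
instance (trajectories : List (List Int)) : Decidable (Pre_build_trajectory_array_buffer trajectories) := by unfold Pre_build_trajectory_array_buffer; infer_instance

def pvWitness_build_trajectory_array_buffer : List (List Int) := [[1, 2, 3], [4]]

def Spec_build_trajectory_array_buffer (trajectories : List (List Int)) (out : Option (List Int)) : Prop := out = build_trajectory_array_buffer_alt trajectories
instance (trajectories : List (List Int)) (out : Option (List Int)) : Decidable (Spec_build_trajectory_array_buffer trajectories out) := by unfold Spec_build_trajectory_array_buffer; infer_instance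

-- ===== CLAIM (what is proved, stated in full; the proofs are below) =====
def Claim_equal_build_trajectory_array_buffer : Prop := ∀ (trajectories : List (List Int)), Dom_build_trajectory_array_buffer trajectories → Pre_build_trajectory_array_buffer trajectories → Spec_build_trajectory_array_buffer trajectories (build_trajectory_array_buffer trajectories)

-- ===== LEMMAS AND PROOFS =====

lemma fillSlots_nil (k : Nat) :
    fillSlots [] k = List.replicate (k * 12) (0 : Int) := by
  induction k with
  | zero => simp [fillSlots]
  | succ m ih => simp [fillSlots, ih, Nat.succ_mul, Nat.add_comm, List.replicate_add]

lemma fillSlots_eq (ts : List (List Int)) :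
    ∀ (k : Nat), ts.length ≤ k →
    fillSlots ts k = ts.flatten ++ List.replicate ((k - ts.length) * 12) (0 : Int) := by
  induction ts with
  | nil => intro k _; simp [fillSlots_nil]
  | cons t ts ih =>
    intro k hk
    cases k with
    | zero => simp at hk
    | succ m =>
      simp only [fillSlots, List.flatten_cons, List.append_assoc]
      rw [ih m (by simpa using hk)]
      simp

-- Overwriting positions pre.length, pre.length+1, … of pre ++ buf with the elements of ts
-- (as A's enumerate loop does) yields pre ++ ts ++ (what is left of buf).
lemma set_enumerate_loop (ts : List (List Int)) :
    ∀ (pre buf : List (List Int)), ts.length ≤ buf.length →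
    List.foldl (fun b (p : Int × List Int) => b.set p.1.toNat p.2)
      (pre ++ buf) (PySem.List.enumerate ts (pre.length : Int))
      = pre ++ ts ++ buf.drop ts.length := by
  induction ts with
  | nil => simp
  | cons t ts ih =>
    intro pre buf hlen
    cases buf with
    | nil => simp at hlen
    | cons b0 bs =>
      rw [PySem.List.enumerate_cons]
      simp only [List.foldl_cons]
      have hset : (pre ++ b0 :: bs).set ((pre.length : Int)).toNat t
          = (pre ++ [t]) ++ bs := by
        simp [List.set_append_right, List.append_assoc]
      rw [hset]
      have hstart : ((pre.length : Int) + 1) = ((pre ++ [t]).length : Int) := by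
        simp
      rw [hstart, ih (pre ++ [t]) bs (by simpa using hlen)]
      simp [List.append_assoc]

lemma flatten_replicate_row (n : Nat) :
    (List.replicate n ([0, 0, 0, 0, 0, 0, 0, 0, 0, 0, 0, 0] : List Int)).flatten
      = List.replicate (n * 12) 0 := by
  induction n with
  | zero => simp
  | succ k ih => simp [List.replicate_succ, ih, Nat.succ_mul, Nat.add_comm, List.replicate_add]

-- ===== VERDICT (by name: the statement is the Claim_ definition above) =====
theorem build_trajectory_array_buffer_spec : Claim_equal_build_trajectory_array_buffer := by
  unfold Claim_equal_build_trajectory_array_buffer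
  intro ts _ hpre
  unfold Spec_build_trajectory_array_buffer
  unfold build_trajectory_array_buffer build_trajectory_array_buffer_alt
  cases ts with
  | nil => simp
  | cons t ts' =>
    simp only [List.isEmpty_cons, Bool.false_or, List.length_cons, beq_iff_eq]
    rw [if_neg (by omega), if_neg (by simp)]
    have hn : (t :: ts').length ≤ 10 := by simpa [Pre_build_trajectory_array_buffer] using hpre
    have h := set_enumerate_loop (t :: ts') [] (List.replicate 10 (List.replicate 12 (0 : Int)))
      (by simpa using hn)
    simp only [List.nil_append, List.length_nil, Nat.cast_zero] at h
    rw [h, fillSlots_eq _ 10 hn]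
    congr 1
    congr 1
    unfold pyFlatten
    rw [List.drop_replicate, List.flatMap_append]
    congr 1
    · simp [List.flatMap]
    · rw [List.flatMap_replicate]
      norm_num [show (List.replicate 12 (0:Int)) = [0,0,0,0,0,0,0,0,0,0,0,0] from by decide]
      exact flatten_replicate_row _
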